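-- pv_equiv track=rewrite | github.com/Jabbastin-akash/hack | backend/app/services/recommendation_service.py | get_related_subjects
-- ===== SOURCE A (Python) =====
-- from typing import List, Dict
--
-- def get_related_subjects(subject: str) -> List[str]:
--     """
--     Get related subjects for cross-topic learning.
--
--     Args:
--         subject: Current subject
--
--     Returns:
--         List of related subjects
--     """
--     # Subject groupings
--     biology_topics = ["heart", "dna", "cell"]
--     physics_topics = ["atom", "lever", "pendulum", "ac circuit"]
--
--     if subject in biology_topics:
--         return [t for t in biology_topics if t != subject]
--     elif subject in physics_topics:
--         return [t for t in physics_topics if t != subject]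
--
--     return []
-- ===== SOURCE B (Python) =====
-- from typing import List
--
-- def get_related_subjects(subject: str) -> List[str]:
--     groups = [["heart", "dna", "cell"], ["atom", "lever", "pendulum", "ac circuit"]]
--     # Materialise the whole "is related to" relation as a flat edge list,
--     # then answer the query by a single relational selection on it.
--     edges = [(a, b) for g in groups for a in g for b in g if a != b]
--     return [b for (a, b) in edges if a == subject]
-- ===== Notes on version B (the rewrite author's own statement) =====
-- stated objective: alternative
-- what changed: Instead of finding the group containing the subject and filtering it, B materialises the full related-to relation as a flat edge list of (topic, related) pairs and answers by a single selection over that relation; no membership test or group lookup remains.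
import Mathlib
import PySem

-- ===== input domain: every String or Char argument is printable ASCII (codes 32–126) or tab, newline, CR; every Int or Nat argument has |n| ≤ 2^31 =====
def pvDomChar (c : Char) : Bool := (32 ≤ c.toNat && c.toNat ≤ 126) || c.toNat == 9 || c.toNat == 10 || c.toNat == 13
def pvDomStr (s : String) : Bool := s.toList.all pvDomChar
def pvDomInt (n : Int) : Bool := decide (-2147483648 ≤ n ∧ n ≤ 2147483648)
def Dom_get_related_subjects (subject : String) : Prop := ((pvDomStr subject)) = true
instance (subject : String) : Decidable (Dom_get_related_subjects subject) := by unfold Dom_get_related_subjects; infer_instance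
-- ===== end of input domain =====

-- B materialises the full related-to relation as a flat edge list and answers by one selection on it (alternative; same cost).
-- ===== PORT A =====
def get_related_subjects (subject : String) : List String :=
  let biology_topics : List String := ["heart", "dna", "cell"]
  let physics_topics : List String := ["atom", "lever", "pendulum", "ac circuit"]
  if subject ∈ biology_topics then
    biology_topics.filter (fun t => t != subject)
  else if subject ∈ physics_topics then
    physics_topics.filter (fun t => t != subject)
  else []

-- ===== PORT B =====
def get_related_subjects_alt (subject : String) : List String :=
  let groups : List (List String) :=
    [["heart", "dna", "cell"], ["atom", "lever", "pendulum", "ac circuit"]]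
  -- [(a, b) for g in groups for a in g for b in g if a != b]
  let edges : List (String × String) :=
    groups.flatMap (fun g => g.flatMap (fun a => (g.filter (fun b => a != b)).map (fun b => (a, b))))
  -- [b for (a, b) in edges if a == subject]
  (edges.filter (fun p => p.1 == subject)).map (fun p => p.2)

-- ===== PRECONDITION & SPEC =====
def Spec_get_related_subjects (subject : String) (out : List String) : Prop := out = get_related_subjects_alt subject
instance (subject : String) (out : List String) : Decidable (Spec_get_related_subjects subject out) := by unfold Spec_get_related_subjects; infer_instance

-- ===== CLAIM =====
def Claim_equal_get_related_subjects : Prop := ∀ (subject : String), Dom_get_related_subjects subject → Spec_get_related_subjects subject (get_related_subjects subject)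

-- ===== LEMMAS AND PROOFS =====
theorem get_related_subjects_eq (subject : String) :
    get_related_subjects subject = get_related_subjects_alt subject := by
  by_cases h1 : subject = "heart"; · subst h1; decide
  by_cases h2 : subject = "dna"; · subst h2; decide
  by_cases h3 : subject = "cell"; · subst h3; decide
  by_cases h4 : subject = "atom"; · subst h4; decide
  by_cases h5 : subject = "lever"; · subst h5; decide
  by_cases h6 : subject = "pendulum"; · subst h6; decide
  by_cases h7 : subject = "ac circuit"; · subst h7; decide
  simp [get_related_subjects, get_related_subjects_alt,
    Ne.symm h1, Ne.symm h2, Ne.symm h3, Ne.symm h4, Ne.symm h5, Ne.symm h6, Ne.symm h7,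
    h1, h2, h3, h4, h5, h6, h7]

-- ===== VERDICT =====
theorem get_related_subjects_spec : Claim_equal_get_related_subjects := by
  intro subject _
  exact get_related_subjects_eq subject
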